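-- pv_equiv track=rewrite | github.com/alfalhei/VARA-tool | graduation_project/project_root/app.py | determine_environment_type
-- ===== SOURCE A (Python) =====
-- def determine_environment_type(env_info: dict) -> str:
--     """Determine the type of environment based on detected components."""
--     if any('prod' in str(item).lower() for item in env_info['servers']):
--         return 'Production'
--     elif any('dev' in str(item).lower() for item in env_info['servers']):
--         return 'Development'
--     elif any('test' in str(item).lower() for item in env_info['servers']):
--         return 'Testing'
--     return 'Unknown'
-- ===== SOURCE B (Python) =====
-- def determine_environment_type(env_info: dict) -> str:
--     """Single pass: collect flags, then decide by priority prod > dev > test."""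
--     has_prod = has_dev = has_test = False
--     for item in env_info['servers']:
--         s = str(item).lower()
--         has_prod = has_prod or 'prod' in s
--         has_dev = has_dev or 'dev' in s
--         has_test = has_test or 'test' in s
--     if has_prod:
--         return 'Production'
--     if has_dev:
--         return 'Development'
--     if has_test:
--         return 'Testing'
--     return 'Unknown'
-- ===== Notes on version B (the rewrite author's own statement) =====
-- stated objective: alternative
-- what changed: Replaces A's three separate any()-scans (up to three passes over the server list) with one pass that ORs three boolean flags and decides by priority after the loop.
import Mathlib
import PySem

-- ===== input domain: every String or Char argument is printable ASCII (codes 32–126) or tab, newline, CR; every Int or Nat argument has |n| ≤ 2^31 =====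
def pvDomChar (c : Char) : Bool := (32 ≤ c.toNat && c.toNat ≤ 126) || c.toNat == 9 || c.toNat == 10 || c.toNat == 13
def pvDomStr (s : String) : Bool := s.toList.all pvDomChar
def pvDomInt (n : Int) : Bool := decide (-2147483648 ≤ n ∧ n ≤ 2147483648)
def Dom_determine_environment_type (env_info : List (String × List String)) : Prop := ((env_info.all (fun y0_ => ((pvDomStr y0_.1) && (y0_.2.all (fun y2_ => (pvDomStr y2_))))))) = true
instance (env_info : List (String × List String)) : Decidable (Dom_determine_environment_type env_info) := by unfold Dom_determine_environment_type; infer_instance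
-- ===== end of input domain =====

-- B makes one pass ORing three flags instead of A's up-to-three any() scans; return value only.
-- ===== PORT A =====
def determine_environment_type (env_info : List (String × List String)) : String :=
  match (PySem.Dict.mk env_info).get? "servers" with
  | none => ""  -- KeyError in Python; excluded by Pre_
  | some servers =>
    if servers.any (fun item => PySem.Str.isIn "prod" (PySem.Str.lower item)) then "Production"
    else if servers.any (fun item => PySem.Str.isIn "dev" (PySem.Str.lower item)) then "Development"
    else if servers.any (fun item => PySem.Str.isIn "test" (PySem.Str.lower item)) then "Testing"
    else "Unknown"

-- ===== PORT B =====
def determine_environment_type_alt (env_info : List (String × List String)) : String :=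
  match (PySem.Dict.mk env_info).get? "servers" with
  | none => ""  -- KeyError in Python; excluded by Pre_
  | some servers =>
    let flags := servers.foldl
      (fun (acc : Bool × Bool × Bool) item =>
        let s := PySem.Str.lower item
        (acc.1 || PySem.Str.isIn "prod" s,
         acc.2.1 || PySem.Str.isIn "dev" s,
         acc.2.2 || PySem.Str.isIn "test" s))
      (false, false, false)
    if flags.1 then "Production"
    else if flags.2.1 then "Development"
    else if flags.2.2 then "Testing"
    else "Unknown"

-- ===== PRECONDITION & SPEC =====
-- Pre_ excludes exactly the dicts without a 'servers' key, on which Python A raises KeyError (B raises too).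
def Pre_determine_environment_type (env_info : List (String × List String)) : Prop :=
  (PySem.Dict.mk env_info).contains "servers" = true
instance (env_info : List (String × List String)) : Decidable (Pre_determine_environment_type env_info) := by
  unfold Pre_determine_environment_type; infer_instance
def pvWitness_determine_environment_type : (List (String × List String)) := [("servers", ["prod-01", "dev-02"])]

def Spec_determine_environment_type (env_info : List (String × List String)) (out : String) : Prop := out = determine_environment_type_alt env_info
instance (env_info : List (String × List String)) (out : String) : Decidable (Spec_determine_environment_type env_info out) := by unfold Spec_determine_environment_type; infer_instance

-- ===== CLAIM (what is proved, stated in full; the proofs are below) =====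
def Claim_equal_determine_environment_type : Prop := ∀ (env_info : List (String × List String)), Dom_determine_environment_type env_info → Pre_determine_environment_type env_info → Spec_determine_environment_type env_info (determine_environment_type env_info)

-- ===== LEMMAS AND PROOFS =====
-- The fold in B computes exactly the three any()-flags of A.
theorem flags_eq (servers : List String) (a b c : Bool) :
    servers.foldl
      (fun (acc : Bool × Bool × Bool) item =>
        let s := PySem.Str.lower item
        (acc.1 || PySem.Str.isIn "prod" s,
         acc.2.1 || PySem.Str.isIn "dev" s,
         acc.2.2 || PySem.Str.isIn "test" s))
      (a, b, c)
    = (a || servers.any (fun item => PySem.Str.isIn "prod" (PySem.Str.lower item)),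
       b || servers.any (fun item => PySem.Str.isIn "dev" (PySem.Str.lower item)),
       c || servers.any (fun item => PySem.Str.isIn "test" (PySem.Str.lower item))) := by
  induction servers generalizing a b c with
  | nil => simp
  | cons h t ih => simp only [List.foldl_cons, List.any_cons]; rw [ih]; simp [Bool.or_assoc]

-- ===== VERDICT (by name: the statement is the Claim_ definition above) =====
theorem determine_environment_type_spec : Claim_equal_determine_environment_type := by
  intro env_info _ _
  unfold Spec_determine_environment_type determine_environment_type determine_environment_type_alt
  cases (PySem.Dict.mk env_info).get? "servers" with
  | none => rfl
  | some servers => simp only [flags_eq, Bool.false_or]
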